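-- pv_equiv track=rewrite | github.com/SiteRelEnby/tracebit-python | src/tracebit/ssh.py | _remove_host_block
-- ===== SOURCE A (Python) =====
-- def _remove_host_block(text, ssh_host):
--     """Remove a Host block matching ssh_host from ssh config text."""
--     lines = text.splitlines(keepends=True)
--     result = []
--     in_block = False
--     for line in lines:
--         parts = line.strip().split()
--         if parts and parts[0].lower() == "host":
--             in_block = len(parts) > 1 and parts[1] == ssh_host
--             if in_block:
--                 continue
--         if not in_block:
--             result.append(line)
--     return "".join(result)
-- ===== SOURCE B (Python) =====
-- def _remove_host_block(text, ssh_host):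
--     """Remove a Host block matching ssh_host from ssh config text.
--
--     Two-pass: group lines into blocks at each Host header, then drop the
--     block whose header names ssh_host and join the survivors."""
--     lines = text.splitlines(keepends=True)
--     blocks = []
--     current = []
--     for line in lines:
--         parts = line.strip().split()
--         if parts and parts[0].lower() == "host":
--             blocks.append(current)
--             current = [line]
--         else:
--             current.append(line)
--     blocks.append(current)
--
--     def drops(block):
--         if not block:
--             return False
--         parts = block[0].strip().split()
--         return len(parts) > 1 and parts[0].lower() == "host" and parts[1] == ssh_host
--
--     return "".join(line for b in blocks if not drops(b) for line in b)
-- ===== Notes on version B (the rewrite author's own statement) =====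
-- stated objective: alternative
-- what changed: Replaced the in_block flag machine with a two-pass group-then-filter: lines are first grouped into consecutive blocks starting at each Host header, then blocks whose header names ssh_host are dropped and the rest joined.
import Mathlib
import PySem

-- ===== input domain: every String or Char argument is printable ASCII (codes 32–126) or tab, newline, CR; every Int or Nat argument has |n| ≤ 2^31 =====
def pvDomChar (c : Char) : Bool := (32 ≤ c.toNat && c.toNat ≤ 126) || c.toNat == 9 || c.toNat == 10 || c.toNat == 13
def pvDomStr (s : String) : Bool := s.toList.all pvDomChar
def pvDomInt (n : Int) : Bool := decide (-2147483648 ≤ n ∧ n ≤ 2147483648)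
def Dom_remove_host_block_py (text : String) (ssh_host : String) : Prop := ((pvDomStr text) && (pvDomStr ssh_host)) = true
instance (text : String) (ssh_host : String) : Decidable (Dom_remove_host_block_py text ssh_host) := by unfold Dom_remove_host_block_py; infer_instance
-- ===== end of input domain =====

-- B replaces A's in_block flag machine by a two-pass group-then-filter decomposition; return values proved equal on all inputs.

-- shared helper: text.splitlines(keepends=True).  Exact on the Dom alphabet, where the only
-- line breaks are '\n', '\r' and '\r\n' (Python's extra break characters lie outside Dom).
def pvSplitlinesKeep (acc : List Char) : List Char → List (List Char)
  | [] => if acc.isEmpty then [] else [acc]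
  | c :: rest =>
    if c = '\n' then (acc ++ [c]) :: pvSplitlinesKeep [] rest
    else if c = '\r' then
      if rest.head? = some '\n' then (acc ++ ['\r', '\n']) :: pvSplitlinesKeep [] rest.tail
      else (acc ++ [c]) :: pvSplitlinesKeep [] rest
    else pvSplitlinesKeep (acc ++ [c]) rest
termination_by cs => cs.length
decreasing_by all_goals simp [List.length_tail]

-- ===== PORT A =====
-- A's for loop: structural recursion over the lines carrying the in_block flag;
-- result.append becomes cons, "".join becomes flatten.
def pvLoopA (host : List Char) : List (List Char) → Bool → List (List Char)
  | [], _ => []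
  | line :: rest, inb =>
    match PySem.Chars.split₀ (PySem.Chars.strip line) with
    | p0 :: ptail =>
      if PySem.Chars.lower p0 = "host".toList then
        match ptail with
        | p1 :: _ =>
          if p1 = host then pvLoopA host rest true
          else line :: pvLoopA host rest false
        | [] => line :: pvLoopA host rest false
      else if inb then pvLoopA host rest inb else line :: pvLoopA host rest inb
    | [] => if inb then pvLoopA host rest inb else line :: pvLoopA host rest inb

def remove_host_block_py (text : String) (ssh_host : String) : String :=
  String.ofList (pvLoopA ssh_host.toList (pvSplitlinesKeep [] text.toList) false).flatten

-- ===== PORT B =====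
-- Source B's grouping loop: recursion carrying (blocks, current).
def pvIsHeader (line : List Char) : Bool :=
  match PySem.Chars.split₀ (PySem.Chars.strip line) with
  | p0 :: _ => PySem.Chars.lower p0 = "host".toList
  | [] => false

def pvBuildBlocks : List (List Char) → List (List (List Char)) → List (List Char) → List (List (List Char))
  | [], blocks, current => blocks ++ [current]
  | line :: rest, blocks, current =>
    if pvIsHeader line then pvBuildBlocks rest (blocks ++ [current]) [line]
    else pvBuildBlocks rest blocks (current ++ [line])

def pvDrops (host : List Char) (block : List (List Char)) : Bool :=
  match block with
  | [] => false
  | first :: _ =>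
    match PySem.Chars.split₀ (PySem.Chars.strip first) with
    | p0 :: p1 :: _ => PySem.Chars.lower p0 = "host".toList && p1 = host
    | _ => false

def remove_host_block_py_alt (text : String) (ssh_host : String) : String :=
  String.ofList (((pvBuildBlocks (pvSplitlinesKeep [] text.toList) [] []).filter
    (fun b => !pvDrops ssh_host.toList b)).flatten).flatten

-- ===== PRECONDITION & SPEC =====
def Spec_remove_host_block_py (text : String) (ssh_host : String) (out : String) : Prop := out = remove_host_block_py_alt text ssh_host
instance (text : String) (ssh_host : String) (out : String) : Decidable (Spec_remove_host_block_py text ssh_host out) := by unfold Spec_remove_host_block_py; infer_instance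

-- ===== CLAIM (what is proved, stated in full; the proofs are below) =====
def Claim_equal_remove_host_block_py : Prop := ∀ (text : String) (ssh_host : String), Dom_remove_host_block_py text ssh_host → Spec_remove_host_block_py text ssh_host (remove_host_block_py text ssh_host)

-- ===== LEMMAS AND PROOFS =====

-- A's loop step, phrased through B's predicates pvIsHeader / pvDrops
theorem pvLoopA_cons (host line : List Char) (rest : List (List Char)) (inb : Bool) :
    pvLoopA host (line :: rest) inb =
      if pvIsHeader line then
        (if pvDrops host [line] then pvLoopA host rest true else line :: pvLoopA host rest false)
      else (if inb then pvLoopA host rest inb else line :: pvLoopA host rest inb) := by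
  cases hp : PySem.Chars.split₀ (PySem.Chars.strip line) with
  | nil => simp [pvLoopA, pvIsHeader, hp]
  | cons p0 ptail =>
    by_cases hh : PySem.Chars.lower p0 = "host".toList
    · cases ptail with
      | nil => simp [pvLoopA, pvIsHeader, pvDrops, hp, hh]
      | cons p1 pr =>
        by_cases hp1 : p1 = host <;> simp [pvLoopA, pvIsHeader, pvDrops, hp, hh, hp1]
    · have hh2 : ¬ PySem.Chars.lower p0 = ['h', 'o', 's', 't'] := by simpa using hh
      simp [pvLoopA, pvIsHeader, hp, hh2]

-- accumulator lemma for the grouping loop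
theorem pvBuildBlocks_acc (ls : List (List Char)) (blocks : List (List (List Char))) (cur : List (List Char)) :
    pvBuildBlocks ls blocks cur = blocks ++ pvBuildBlocks ls [] cur := by
  induction ls generalizing blocks cur with
  | nil => simp [pvBuildBlocks]
  | cons line rest ih =>
    simp only [pvBuildBlocks]
    split
    · rw [ih (blocks ++ [cur]), ih ([] ++ [cur])]; simp
    · exact ih blocks (cur ++ [line])

-- appending a non-header line to the current block does not change whether it is dropped
theorem pvDrops_append (host : List Char) (cur : List (List Char)) (line : List Char)
    (h : pvIsHeader line = false) : pvDrops host (cur ++ [line]) = pvDrops host cur := by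
  cases cur with
  | cons f r => simp [pvDrops]
  | nil =>
    simp only [List.nil_append, pvDrops]
    unfold pvIsHeader at h
    split
    · next p0 p1 rest heq =>
      rw [heq] at h; simp_all
    · rfl

-- main invariant: the filtered-blocks pass produces exactly what A's flag machine keeps,
-- with the flag equal to "the current block is being dropped"
theorem pvMain (host : List Char) (ls : List (List Char)) (cur : List (List Char)) :
    ((pvBuildBlocks ls [] cur).filter (fun b => !pvDrops host b)).flatten
      = (if pvDrops host cur then [] else cur) ++ pvLoopA host ls (pvDrops host cur) := by
  induction ls generalizing cur with
  | nil =>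
    simp only [pvBuildBlocks, pvLoopA, List.append_nil]
    by_cases h : pvDrops host cur = true <;> simp [h]
  | cons line rest ih =>
    simp only [pvBuildBlocks, pvLoopA_cons]
    by_cases hh : pvIsHeader line = true
    · simp only [hh, if_true]
      rw [pvBuildBlocks_acc, List.filter_append, List.flatten_append, ih [line]]
      by_cases hd : pvDrops host [line] = true <;>
        by_cases hc : pvDrops host cur = true <;>
          simp [hd, hc]
    · have hh' : pvIsHeader line = false := by simpa using hh
      simp only [hh', Bool.false_eq_true, if_false]
      rw [ih (cur ++ [line]), pvDrops_append host cur line hh']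
      by_cases hc : pvDrops host cur = true <;> simp [hc]

-- ===== VERDICT (by name: the statement is the Claim_ definition above) =====
theorem remove_host_block_py_spec : Claim_equal_remove_host_block_py := by
  intro text ssh_host _
  unfold Spec_remove_host_block_py remove_host_block_py remove_host_block_py_alt
  have h := pvMain ssh_host.toList (pvSplitlinesKeep [] text.toList) []
  rw [show pvDrops ssh_host.toList [] = false from rfl] at h
  simp only [Bool.false_eq_true, if_false, List.nil_append] at h
  rw [h]
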